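-- pv_equiv track=rewrite | github.com/linhdvu14/cp-sols | sols/CodeForces/1888_d2/D1_Dances_Easy_version_.py | solve
-- ===== SOURCE A (Python) =====
-- def solve(N, M, A, B):
--     A = sorted([1] + A)
--     B.sort()
--
--     def find(val, i):
--         lo, hi, idx = i, N - 1, -2
--         while lo <= hi:
--             mi = (lo + hi) // 2
--             if B[mi] > val:
--                 idx = mi
--                 hi = mi - 1
--             else:
--                 lo = mi + 1
--         return idx
--
--     start = 0
--     for i, a in enumerate(A):
--         start = find(a, start) + 1
--         if start == -1: return N - i
--
--     return 0
-- ===== SOURCE B (Python) =====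
-- def solve(N, M, A, B):
--     A = sorted([1] + A)
--     B.sort()
--     i = 0
--     for j in range(N):
--         if i < len(A) and A[i] < B[j]:
--             i += 1
--     return 0 if i == len(A) else N - i
-- ===== Notes on version B (the rewrite author's own statement) =====
-- stated objective: simpler
-- what changed: Replaced the A-major greedy (loop over sorted A with a per-element binary search into B and an early return) by a B-major counting scan: one loop over the first N elements of sorted B advancing a match counter into A, with the answer computed from the final count by a closed formula.
import Mathlib
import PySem

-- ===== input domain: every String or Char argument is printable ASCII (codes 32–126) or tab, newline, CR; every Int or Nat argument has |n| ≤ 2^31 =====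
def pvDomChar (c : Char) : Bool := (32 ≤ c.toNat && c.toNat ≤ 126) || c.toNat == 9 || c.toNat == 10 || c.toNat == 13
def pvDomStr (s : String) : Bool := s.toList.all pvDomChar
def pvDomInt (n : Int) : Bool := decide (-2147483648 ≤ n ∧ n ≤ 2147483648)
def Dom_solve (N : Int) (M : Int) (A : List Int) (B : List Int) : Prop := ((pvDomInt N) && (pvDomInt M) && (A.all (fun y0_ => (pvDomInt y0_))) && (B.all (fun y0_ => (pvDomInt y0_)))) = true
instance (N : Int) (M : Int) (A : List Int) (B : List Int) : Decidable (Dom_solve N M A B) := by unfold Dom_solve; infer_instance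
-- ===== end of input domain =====

-- B replaces A's A-major greedy (binary search per element, early return) with a B-major counting
-- scan over the first N elements of sorted B plus a closed formula (simpler control flow).
-- Python A mutates its argument B in place (B.sort()); B does the same; the equivalence proved here is about the RETURN value.

-- ===== PORT A =====
-- inner binary search `find(val, i)`: loop over lo, hi, idx
def pvFind (C : List Int) (val : Int) (lo hi idx : Int) : Int :=
  if h : lo ≤ hi then
    match PySem.List.pyGet? C (PySem.Int.floordiv (lo + hi) 2) with
    | none => idx    -- Python raises IndexError here; unreachable under Pre_solve
    | some b =>
      if b > val then pvFind C val lo (PySem.Int.floordiv (lo + hi) 2 - 1) (PySem.Int.floordiv (lo + hi) 2)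
      else pvFind C val (PySem.Int.floordiv (lo + hi) 2 + 1) hi idx
  else idx
termination_by (hi + 1 - lo).toNat
decreasing_by
  · obtain ⟨h1, h2⟩ := PySem.Int.floordiv_two_mid_bounds h; omega
  · obtain ⟨h1, h2⟩ := PySem.Int.floordiv_two_mid_bounds h; omega

-- `for i, a in enumerate(A): start = find(a, start) + 1; if start == -1: return N - i`
def pvLoopA (N : Int) (C : List Int) : List Int → Int → Int → Int
  | [], _, _ => 0
  | a :: rest, i, start =>
      let start' := pvFind C a start (N - 1) (-2) + 1
      if start' = -1 then N - i else pvLoopA N C rest (i + 1) start'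

def solve (N : Int) (M : Int) (A : List Int) (B : List Int) : Int :=
  pvLoopA N (PySem.List.sorted B (fun x => x) false)
    (PySem.List.sorted (1 :: A) (fun x => x) false) 0 0

-- ===== PORT B =====
-- `for j in range(N): if i < len(A) and A[i] < B[j]: i += 1`
def pvLoopC (Asrt Bsrt : List Int) : List Int → Int → Int
  | [], i => i
  | j :: rest, i =>
      pvLoopC Asrt Bsrt rest
        (if i < (Asrt.length : Int) then
          match PySem.List.pyGet? Asrt i, PySem.List.pyGet? Bsrt j with
          | some a, some b => if a < b then i + 1 else i
          | _, _ => i    -- Python raises IndexError here; unreachable under Pre_solve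
        else i)

def solve_alt (N : Int) (M : Int) (A : List Int) (B : List Int) : Int :=
  let Asrt := PySem.List.sorted (1 :: A) (fun x => x) false
  let Bsrt := PySem.List.sorted B (fun x => x) false
  let m := pvLoopC Asrt Bsrt (PySem.List.pyRange 0 N 1) 0
  if m = (Asrt.length : Int) then 0 else N - m

-- ===== PRECONDITION & SPEC =====
-- Pre_ excludes N > len(B), on which A's binary search indexes past the end of B and generally
-- raises IndexError (where it happens to return, the value depends on the accidental probe pattern).
def Pre_solve (N : Int) (M : Int) (A : List Int) (B : List Int) : Prop := N ≤ (B.length : Int)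
instance (N : Int) (M : Int) (A : List Int) (B : List Int) : Decidable (Pre_solve N M A B) := by unfold Pre_solve; infer_instance

def pvWitness_solve : Int × Int × List Int × List Int := (2, 1, [3], [2, 5])

def Spec_solve (N : Int) (M : Int) (A : List Int) (B : List Int) (out : Int) : Prop := out = solve_alt N M A B
instance (N : Int) (M : Int) (A : List Int) (B : List Int) (out : Int) : Decidable (Spec_solve N M A B out) := by unfold Spec_solve; infer_instance

-- ===== CLAIM (what is proved, stated in full; the proofs are below) =====
def Claim_equal_solve : Prop := ∀ (N : Int) (M : Int) (A : List Int) (B : List Int), Dom_solve N M A B → Pre_solve N M A B → Spec_solve N M A B (solve N M A B)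

-- ===== LEMMAS AND PROOFS =====

-- proof-side intermediate program: A-major greedy with a monotone linear pointer into B
def pvAdv (C : List Int) (N : Int) (a : Int) (j : Int) : Int :=
  if h : j < N then
    match PySem.List.pyGet? C j with
    | none => j
    | some b => if b ≤ a then pvAdv C N a (j + 1) else j
  else j
termination_by (N - j).toNat
decreasing_by omega

def pvLoopB (N : Int) (C : List Int) : List Int → Int → Int → Int
  | [], _, _ => 0
  | a :: rest, i, j =>
      let j' := pvAdv C N a j
      if j' ≥ N then N - i else pvLoopB N C rest (i + 1) (j' + 1)

-- "position k of C holds a value greater than val" (k an in-range Python index)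
def pvGt (C : List Int) (val k : Int) : Prop :=
  match PySem.List.pyGet? C k with
  | some b => val < b
  | none => False

theorem pvGt_iff (C : List Int) (val k : Int) (h0 : 0 ≤ k) (h1 : k < (C.length : Int)) :
    pvGt C val k ↔ val < C[k.toNat]'(by omega) := by
  unfold pvGt
  rw [PySem.List.pyGet?_eq_some_getElem C h0 h1]

-- on the sorted list, pvGt is upward closed
theorem pvGt_mono (B : List Int) (val p q : Int) (h0 : 0 ≤ p) (hpq : p ≤ q)
    (hq : q < ((PySem.List.sorted B (fun x => x) false).length : Int))
    (hp : pvGt (PySem.List.sorted B (fun x => x) false) val p) :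
    pvGt (PySem.List.sorted B (fun x => x) false) val q := by
  rw [pvGt_iff _ _ _ h0 (by omega)] at hp
  rw [pvGt_iff _ _ _ (by omega) hq]
  exact hp.trans_le (PySem.List.sorted_id_getElem_mono B (by omega) (by omega))

-- what A's binary search returns: the least index in [lo, hi] exceeding val, else idx
theorem pvFind_spec (B : List Int) (val lo hi idx : Int) (h0 : 0 ≤ lo)
    (hhi : hi < ((PySem.List.sorted B (fun x => x) false).length : Int)) :
    (pvFind (PySem.List.sorted B (fun x => x) false) val lo hi idx = idx ∧
      ∀ k, lo ≤ k → k ≤ hi → ¬ pvGt (PySem.List.sorted B (fun x => x) false) val k) ∨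
    (lo ≤ pvFind (PySem.List.sorted B (fun x => x) false) val lo hi idx ∧
      pvFind (PySem.List.sorted B (fun x => x) false) val lo hi idx ≤ hi ∧
      pvGt (PySem.List.sorted B (fun x => x) false) val (pvFind (PySem.List.sorted B (fun x => x) false) val lo hi idx) ∧
      ∀ k, lo ≤ k → k < pvFind (PySem.List.sorted B (fun x => x) false) val lo hi idx →
        ¬ pvGt (PySem.List.sorted B (fun x => x) false) val k) := by
  rw [pvFind]
  by_cases h : lo ≤ hi
  · obtain ⟨hm1, hm2⟩ := PySem.Int.floordiv_two_mid_bounds h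
    have hget := PySem.List.pyGet?_eq_some_getElem (PySem.List.sorted B (fun x => x) false)
        (i := PySem.Int.floordiv (lo + hi) 2) (by omega) (by omega)
    rw [dif_pos h]
    split
    next heq => rw [hget] at heq; exact absurd heq (by simp)
    next b heq =>
    rw [hget] at heq
    obtain rfl : b = _ := (Option.some.injEq _ _ ▸ heq.symm)
    by_cases hb : (PySem.List.sorted B (fun x => x) false)[(PySem.Int.floordiv (lo + hi) 2).toNat]'(by omega) > val
    · rw [if_pos hb]
      have hgtmi : pvGt (PySem.List.sorted B (fun x => x) false) val (PySem.Int.floordiv (lo + hi) 2) :=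
        (pvGt_iff _ _ _ (by omega) (by omega)).mpr hb
      rcases pvFind_spec B val lo (PySem.Int.floordiv (lo + hi) 2 - 1) (PySem.Int.floordiv (lo + hi) 2) h0 (by omega) with
        ⟨heq, hall⟩ | ⟨h1, h2, h3, h4⟩
      · right
        rw [heq]
        exact ⟨by omega, by omega, hgtmi, fun k hk1 hk2 => hall k hk1 (by omega)⟩
      · right
        exact ⟨h1, by omega, h3, h4⟩
    · rw [if_neg hb]
      have hnot : ∀ k, lo ≤ k → k ≤ PySem.Int.floordiv (lo + hi) 2 →
          ¬ pvGt (PySem.List.sorted B (fun x => x) false) val k := by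
        intro k hk1 hk2 hgt
        have := pvGt_mono B val k (PySem.Int.floordiv (lo + hi) 2) (by omega) hk2 (by omega) hgt
        rw [pvGt_iff _ _ _ (by omega) (by omega)] at this
        omega
      rcases pvFind_spec B val (PySem.Int.floordiv (lo + hi) 2 + 1) hi idx (by omega) hhi with
        ⟨heq, hall⟩ | ⟨h1, h2, h3, h4⟩
      · left
        refine ⟨heq, fun k hk1 hk2 => ?_⟩
        by_cases hk : k ≤ PySem.Int.floordiv (lo + hi) 2
        · exact hnot k hk1 hk
        · exact hall k (by omega) hk2
      · right
        refine ⟨by omega, h2, h3, fun k hk1 hk2 => ?_⟩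
        by_cases hk : k ≤ PySem.Int.floordiv (lo + hi) 2
        · exact hnot k hk1 hk
        · exact h4 k (by omega) hk2
  · rw [dif_neg h]
    exact Or.inl ⟨rfl, fun k hk1 hk2 => by omega⟩
termination_by (hi + 1 - lo).toNat
decreasing_by
  · obtain ⟨h1, h2⟩ := PySem.Int.floordiv_two_mid_bounds h; omega
  · obtain ⟨h1, h2⟩ := PySem.Int.floordiv_two_mid_bounds h; omega

-- what the linear scan returns: the least index in [j, N) exceeding a, else N
theorem pvAdv_spec (B : List Int) (N a : Int)
    (hN : N ≤ ((PySem.List.sorted B (fun x => x) false).length : Int))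
    (j : Int) (hj0 : 0 ≤ j) (hjN : j ≤ N) :
    (pvAdv (PySem.List.sorted B (fun x => x) false) N a j = N ∧
      ∀ k, j ≤ k → k < N → ¬ pvGt (PySem.List.sorted B (fun x => x) false) a k) ∨
    (j ≤ pvAdv (PySem.List.sorted B (fun x => x) false) N a j ∧
      pvAdv (PySem.List.sorted B (fun x => x) false) N a j < N ∧
      pvGt (PySem.List.sorted B (fun x => x) false) a (pvAdv (PySem.List.sorted B (fun x => x) false) N a j) ∧
      ∀ k, j ≤ k → k < pvAdv (PySem.List.sorted B (fun x => x) false) N a j →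
        ¬ pvGt (PySem.List.sorted B (fun x => x) false) a k) := by
  rw [pvAdv]
  by_cases h : j < N
  · have hget := PySem.List.pyGet?_eq_some_getElem (PySem.List.sorted B (fun x => x) false) (i := j) hj0 (by omega)
    rw [dif_pos h]
    split
    next heq => rw [hget] at heq; exact absurd heq (by simp)
    next b heq =>
    rw [hget] at heq
    obtain rfl : b = _ := (Option.some.injEq _ _ ▸ heq.symm)
    by_cases hb : (PySem.List.sorted B (fun x => x) false)[j.toNat]'(by omega) ≤ a
    · rw [if_pos hb]
      have hnj : ¬ pvGt (PySem.List.sorted B (fun x => x) false) a j := by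
        rw [pvGt_iff _ _ _ hj0 (by omega)]
        omega
      rcases pvAdv_spec B N a hN (j + 1) (by omega) (by omega) with
        ⟨heq, hall⟩ | ⟨h1, h2, h3, h4⟩
      · left
        refine ⟨heq, fun k hk1 hk2 => ?_⟩
        by_cases hk : k = j
        · exact hk ▸ hnj
        · exact hall k (by omega) hk2
      · right
        refine ⟨by omega, h2, h3, fun k hk1 hk2 => ?_⟩
        by_cases hk : k = j
        · exact hk ▸ hnj
        · exact h4 k (by omega) hk2
    · rw [if_neg hb]
      right
      refine ⟨le_refl j, h, (pvGt_iff _ _ _ hj0 (by omega)).mpr (by omega), fun k hk1 hk2 => by omega⟩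
  · rw [dif_neg h]
    left
    exact ⟨by omega, fun k hk1 hk2 => by omega⟩
termination_by (N - j).toNat
decreasing_by omega

-- A's loop and the intermediate loop agree, with the same pointer state
theorem loop_eq (B : List Int) (N : Int)
    (hN : N ≤ ((PySem.List.sorted B (fun x => x) false).length : Int)) :
    ∀ (As : List Int) (i j : Int), 0 ≤ j → j ≤ max N 0 →
      pvLoopA N (PySem.List.sorted B (fun x => x) false) As i j =
      pvLoopB N (PySem.List.sorted B (fun x => x) false) As i j := by
  intro As
  induction As with
  | nil => intro i j _ _; rfl
  | cons a rest ih =>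
    intro i j hj0 hjN
    by_cases hNpos : 0 < N
    · rcases pvFind_spec B a j (N - 1) (-2) hj0 (by omega) with ⟨heqA, hallA⟩ | ⟨hA1, hA2, hA3, hA4⟩ <;>
        rcases pvAdv_spec B N a hN j hj0 (by omega) with ⟨heqB, hallB⟩ | ⟨hB1, hB2, hB3, hB4⟩
      · -- neither finds an index: both return N - i
        show (if pvFind _ a j (N - 1) (-2) + 1 = -1 then N - i else _) =
          (if pvAdv _ N a j ≥ N then N - i else _)
        rw [heqA, heqB, if_pos (by norm_num), if_pos (le_refl N)]
      · -- find reports none, scan finds one: impossible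
        exact absurd hB3 (hallA _ hB1 (by omega))
      · -- find finds one, scan reports none: impossible
        exact absurd hA3 (hallB _ hA1 (by omega))
      · -- both find the least index; it is the same, and both loops continue with it + 1
        have heq : pvFind (PySem.List.sorted B (fun x => x) false) a j (N - 1) (-2) =
            pvAdv (PySem.List.sorted B (fun x => x) false) N a j := by
          by_contra hne
          rcases lt_or_gt_of_ne hne with hlt | hgt
          · exact hB4 _ hA1 hlt hA3
          · exact hA4 _ hB1 hgt hB3
        show (if pvFind _ a j (N - 1) (-2) + 1 = -1 then N - i else pvLoopA _ _ rest (i + 1) _) =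
          (if pvAdv _ N a j ≥ N then N - i else pvLoopB _ _ rest (i + 1) _)
        rw [heq, if_neg (by omega), if_neg (by omega)]
        exact ih (i + 1) (pvAdv (PySem.List.sorted B (fun x => x) false) N a j + 1) (by omega) (by omega)
    · -- N ≤ 0: j = 0, the search range is empty, both return N - i at the first element
      have hfind : pvFind (PySem.List.sorted B (fun x => x) false) a j (N - 1) (-2) = -2 := by
        rw [pvFind, dif_neg (by omega)]
      have hadv : pvAdv (PySem.List.sorted B (fun x => x) false) N a j = j := by
        rw [pvAdv, dif_neg (by omega)]
      show (if pvFind _ a j (N - 1) (-2) + 1 = -1 then N - i else _) =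
        (if pvAdv _ N a j ≥ N then N - i else _)
      rw [hfind, hadv, if_pos (by norm_num), if_pos (by omega)]

-- pvAdv never moves the pointer backwards
theorem pvAdv_ge (C : List Int) (N a : Int) : ∀ (j : Int), j ≤ pvAdv C N a j := by
  intro j
  induction hj : (N - j).toNat using Nat.strong_induction_on generalizing j with
  | _ n ihj =>
  rw [pvAdv]
  by_cases h : j < N
  · rw [dif_pos h]
    cases hg : PySem.List.pyGet? C j with
    | none => exact le_refl j
    | some b =>
      show j ≤ if b ≤ a then pvAdv C N a (j + 1) else j
      by_cases hb : b ≤ a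
      · have := ihj (N - (j + 1)).toNat (by omega) (j + 1) rfl
        rw [if_pos hb]
        omega
      · exact le_of_eq (if_neg hb).symm
  · rw [dif_neg h]

-- once the counter has reached len(A'), pvLoopC never changes it
theorem pvLoopC_const (Asrt Bsrt : List Int) :
    ∀ (r : List Int) (i : Int), ¬ i < (Asrt.length : Int) → pvLoopC Asrt Bsrt r i = i := by
  intro r
  induction r with
  | nil => intro i _; rfl
  | cons j rest ih =>
    intro i hi
    show pvLoopC Asrt Bsrt rest _ = i
    rw [if_neg hi]
    exact ih i hi

-- pvLoopC consumes range elements up to pvAdv's stopping point: skipped positions leave the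
-- counter alone, the stopping position (if < N) increments it
theorem pvLoopC_adv (Asrt Bsrt : List Int) (N : Int)
    (hN : N ≤ (Bsrt.length : Int)) (i : Int) (h0 : 0 ≤ i) (hi : i < (Asrt.length : Int)) :
    ∀ (j : Int), 0 ≤ j →
      pvLoopC Asrt Bsrt (PySem.List.pyRange j N 1) i =
      (if pvAdv Bsrt N (Asrt[i.toNat]'(by omega)) j ≥ N then i
       else pvLoopC Asrt Bsrt (PySem.List.pyRange (pvAdv Bsrt N (Asrt[i.toNat]'(by omega)) j + 1) N 1) (i + 1)) := by
  intro j
  induction hj : (N - j).toNat using Nat.strong_induction_on generalizing j with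
  | _ n ih =>
  intro hj0
  by_cases h : j < N
  · have hgetA := PySem.List.pyGet?_eq_some_getElem Asrt (i := i) h0 hi
    have hgetB := PySem.List.pyGet?_eq_some_getElem Bsrt (i := j) hj0 (by omega)
    have hadv : pvAdv Bsrt N (Asrt[i.toNat]'(by omega)) j =
        (if (Bsrt[j.toNat]'(by omega)) ≤ (Asrt[i.toNat]'(by omega))
         then pvAdv Bsrt N (Asrt[i.toNat]'(by omega)) (j + 1) else j) := by
      rw [pvAdv, dif_pos h, hgetB]
    have hstep : pvLoopC Asrt Bsrt (PySem.List.pyRange j N 1) i =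
        pvLoopC Asrt Bsrt (PySem.List.pyRange (j + 1) N 1)
          (if (Asrt[i.toNat]'(by omega)) < (Bsrt[j.toNat]'(by omega)) then i + 1 else i) := by
      rw [PySem.List.pyRange_one_cons h]
      show pvLoopC Asrt Bsrt (PySem.List.pyRange (j + 1) N 1)
        (if i < (Asrt.length : Int) then
          match PySem.List.pyGet? Asrt i, PySem.List.pyGet? Bsrt j with
          | some a, some b => if a < b then i + 1 else i
          | _, _ => i
        else i) = _
      rw [if_pos hi, hgetA, hgetB]
    by_cases hb : (Bsrt[j.toNat]'(by omega)) ≤ (Asrt[i.toNat]'(by omega))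
    · rw [hstep, if_neg (by omega), hadv, if_pos hb]
      exact ih (N - (j + 1)).toNat (by omega) (j + 1) rfl (by omega)
    · rw [hstep, if_pos (by omega), hadv, if_neg hb, if_neg (by omega)]
  · rw [PySem.List.pyRange_one_eq_nil (by omega)]
    rw [pvAdv, dif_neg h, if_pos (by omega)]
    rfl

-- the intermediate A-major loop equals B's count-then-formula computation
theorem loopB_eq_loopC (Asrt Bsrt : List Int) (N : Int) (hN : N ≤ (Bsrt.length : Int)) :
    ∀ (As : List Int) (i j : Int), 0 ≤ i → i ≤ (Asrt.length : Int) → 0 ≤ j → As = Asrt.drop i.toNat →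
      pvLoopB N Bsrt As i j =
      (if pvLoopC Asrt Bsrt (PySem.List.pyRange j N 1) i = (Asrt.length : Int) then 0
       else N - pvLoopC Asrt Bsrt (PySem.List.pyRange j N 1) i) := by
  intro As
  induction As with
  | nil =>
    intro i j hi0 hile hj0 hdrop
    have hlen : i.toNat ≥ Asrt.length := by
      have := congrArg List.length hdrop
      simp [List.length_drop] at this
      omega
    rw [pvLoopC_const Asrt Bsrt _ i (by omega)]
    rw [if_pos (by omega)]
    rfl
  | cons a rest ih =>
    intro i j hi0 hile hj0 hdrop
    have hilen : i.toNat < Asrt.length := by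
      by_contra hc
      rw [List.drop_eq_nil_of_le (by omega)] at hdrop
      simp at hdrop
    have ha : Asrt[i.toNat]'hilen = a := by
      have h0 := congrArg (fun l => l[0]?) hdrop
      simp only [List.getElem?_drop, Nat.add_zero] at h0
      simp [List.getElem?_eq_getElem hilen] at h0
      exact h0.symm
    have hrest : rest = Asrt.drop (i + 1).toNat := by
      have h1 := congrArg List.tail hdrop
      simp only [List.tail_drop] at h1
      have h2 : (i + 1).toNat = i.toNat + 1 := by omega
      rw [h2]
      simpa using h1
    rw [pvLoopC_adv Asrt Bsrt N hN i hi0 (by omega) j hj0, ha]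
    show (if pvAdv Bsrt N a j ≥ N then N - i else pvLoopB N Bsrt rest (i + 1) (pvAdv Bsrt N a j + 1)) = _
    by_cases hstop : pvAdv Bsrt N a j ≥ N
    · rw [if_pos hstop, if_pos hstop, if_neg (by omega)]
    · have hadvge : j ≤ pvAdv Bsrt N a j := pvAdv_ge Bsrt N a j
      rw [if_neg hstop, if_neg hstop]
      exact ih (i + 1) (pvAdv Bsrt N a j + 1) (by omega) (by omega) (by omega) hrest

-- ===== VERDICT (by name: the statement is the Claim_ definition above) =====
theorem solve_spec : Claim_equal_solve := by
  intro N M A B _ hpre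
  show solve N M A B = solve_alt N M A B
  unfold solve solve_alt
  have hN : N ≤ ((PySem.List.sorted B (fun x => x) false).length : Int) := by
    rw [PySem.List.length_sorted]; exact hpre
  rw [loop_eq B N hN _ 0 0 le_rfl (by omega)]
  exact loopB_eq_loopC _ _ N hN _ 0 0 le_rfl (by positivity) le_rfl rfl
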